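-- pv_equiv track=rewrite | github.com/mmacpherson/SpotifyMatcher | main.py | cluster_albums
-- ===== SOURCE A (Python) =====
-- import itertools
--
-- def album_info(track: dict):
--     return (
--         track.get("album", ""),
--         track.get("artist", ""),
--         # track.get("albumartist", None),
--         track.get("date", ""),
--     )
--
-- def cluster_albums(tracks, min_tracks=3, same_album_fn=album_info):
--
--     # We guess that a collection "has an album" if it has {min_tracks} tracks
--     # from a given album.
--     matched_albums = [
--         (album, album_tracks)
--         for album, album_tracks in (
--             (album, list(album_tracks))
--             for album, album_tracks in itertools.groupby(
--                 (e for e in sorted(tracks, key=same_album_fn) if "album" in e),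
--                 key=same_album_fn,
--             )
--         )
--         if len(album_tracks) > min_tracks
--     ]
--
--     unmatched_tracks = [
--         track
--         for track in tracks
--         if same_album_fn(track) not in [a for (a, b) in matched_albums]
--     ]
--
--     return matched_albums, unmatched_tracks
-- ===== SOURCE B (Python) =====
-- def album_info(track: dict):
--     return (
--         track.get("album", ""),
--         track.get("artist", ""),
--         track.get("date", ""),
--     )
--
-- def cluster_albums(tracks, min_tracks=3, same_album_fn=album_info):
--     # Index tracks that carry an "album" field by their album key, in one pass.
--     groups = {}
--     for track in tracks:
--         if "album" in track:
--             groups.setdefault(same_album_fn(track), []).append(track)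
--
--     # Sorting only the distinct keys reproduces the sorted+groupby order.
--     matched_albums = [
--         (album, groups[album])
--         for album in sorted(groups)
--         if len(groups[album]) > min_tracks
--     ]
--
--     matched_keys = {album for album, _ in matched_albums}
--     unmatched_tracks = [
--         track for track in tracks if same_album_fn(track) not in matched_keys
--     ]
--     return matched_albums, unmatched_tracks
-- ===== Notes on version B (the rewrite author's own statement) =====
-- stated objective: idiomatic
-- what changed: Replaces the full stable sort of all tracks plus itertools.groupby with a one-pass dict index keyed by album_info, sorting only the distinct keys, and a set of matched keys for the unmatched scan.
import Mathlib
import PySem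

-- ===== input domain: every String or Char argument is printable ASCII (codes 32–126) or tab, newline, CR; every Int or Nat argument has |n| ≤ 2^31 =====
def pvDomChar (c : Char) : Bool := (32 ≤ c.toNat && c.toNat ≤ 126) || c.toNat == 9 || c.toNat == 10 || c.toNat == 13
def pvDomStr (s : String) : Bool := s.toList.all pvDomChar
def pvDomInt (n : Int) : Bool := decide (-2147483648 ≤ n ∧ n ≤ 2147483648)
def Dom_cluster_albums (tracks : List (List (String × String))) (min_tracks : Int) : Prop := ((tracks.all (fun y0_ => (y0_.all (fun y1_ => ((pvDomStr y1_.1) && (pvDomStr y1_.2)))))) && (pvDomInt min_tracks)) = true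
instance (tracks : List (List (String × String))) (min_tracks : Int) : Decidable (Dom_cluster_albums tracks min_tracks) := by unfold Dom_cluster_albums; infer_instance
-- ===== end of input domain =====

-- B replaces A's full stable sort + itertools.groupby with a one-pass dict index keyed by
-- album_info, a sort of only the distinct keys, and a set of matched keys (objective: idiomatic).

-- ===== PORT A =====
-- album_info(track) — track.get(k, "") on the association-list dict
def albumInfo (t : List (String × String)) : String × String × String :=
  ((PySem.Dict.mk t).getD "album" "", (PySem.Dict.mk t).getD "artist" "", (PySem.Dict.mk t).getD "date" "")

-- '"album" in e'
def hasAlbum (t : List (String × String)) : Bool := (PySem.Dict.mk t).contains "album"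

-- Python's '<' on the 3-tuple of strings (lexicographic, code-point string order = Lean's '<')
def keyLt (a b : String × String × String) : Bool :=
  a.1 < b.1 || (a.1 == b.1 && (a.2.1 < b.2.1 || (a.2.1 == b.2.1 && a.2.2 < b.2.2)))

-- sorted(tracks, key=same_album_fn): the PySem stable insertion-sort loop (sorted_eq_foldl_insertBy
-- shape) with the tuple comparison written out, since the key is a 3-tuple
def sortByKey (tracks : List (List (String × String))) : List (List (String × String)) :=
  tracks.foldl (fun acc x => PySem.List.insertBy (fun a b => keyLt (albumInfo a) (albumInfo b)) x acc) []

-- itertools.groupby(l, key=same_album_fn) with each group materialized by list(...)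
def groupbyKey : List (List (String × String)) → List ((String × String × String) × (List (List (String × String))))
  | [] => []
  | x :: xs =>
    (albumInfo x, x :: xs.takeWhile (fun y => albumInfo y == albumInfo x)) ::
      groupbyKey (xs.dropWhile (fun y => albumInfo y == albumInfo x))
  termination_by l => l.length
  decreasing_by exact Nat.lt_succ_of_le (List.length_dropWhile_le _ _)

def cluster_albums (tracks : List (List (String × String))) (min_tracks : Int) : (List ((String × String × String) × (List (List (String × String))))) × (List (List (String × String))) :=
  let matched_albums := (groupbyKey ((sortByKey tracks).filter hasAlbum)).filter
    (fun g => min_tracks < (g.2.length : Int))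
  let unmatched_tracks := tracks.filter
    (fun track => !((matched_albums.map (fun ab => ab.1)).contains (albumInfo track)))
  (matched_albums, unmatched_tracks)

-- ===== PORT B =====
-- groups = {}; for t in tracks: if "album" in t: groups.setdefault(key(t), []).append(t)
def buildGroups (tracks : List (List (String × String))) : PySem.Dict (String × String × String) (List (List (String × String))) :=
  tracks.foldl
    (fun d t => if hasAlbum t then d.modify (albumInfo t) [] (fun l => l ++ [t]) else d)
    PySem.Dict.empty

-- sorted(groups): sort the distinct keys (same insertion-sort loop, identity key, tuple order)
def sortKeys (ks : List (String × String × String)) : List (String × String × String) :=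
  ks.foldl (fun acc k => PySem.List.insertBy keyLt k acc) []

def cluster_albums_alt (tracks : List (List (String × String))) (min_tracks : Int) : (List ((String × String × String) × (List (List (String × String))))) × (List (List (String × String))) :=
  let groups := buildGroups tracks
  let matched_albums := ((sortKeys groups.keys).filter
      (fun k => min_tracks < ((groups.getD k []).length : Int))).map
      (fun k => (k, groups.getD k []))
  let matched_keys := PySem.Set.ofList (matched_albums.map (fun ab => ab.1))
  let unmatched_tracks := tracks.filter
    (fun track => !(PySem.Set.contains matched_keys (albumInfo track)))
  (matched_albums, unmatched_tracks)

-- ===== PRECONDITION & SPEC =====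
def Spec_cluster_albums (tracks : List (List (String × String))) (min_tracks : Int) (out : (List ((String × String × String) × (List (List (String × String))))) × (List (List (String × String)))) : Prop := out = cluster_albums_alt tracks min_tracks
instance (tracks : List (List (String × String))) (min_tracks : Int) (out : (List ((String × String × String) × (List (List (String × String))))) × (List (List (String × String)))) : Decidable (Spec_cluster_albums tracks min_tracks out) := by unfold Spec_cluster_albums; infer_instance

-- ===== CLAIM (what is proved, stated in full; the proofs are below) =====
def Claim_equal_cluster_albums : Prop := ∀ (tracks : List (List (String × String))) (min_tracks : Int), Dom_cluster_albums tracks min_tracks → Spec_cluster_albums tracks min_tracks (cluster_albums tracks min_tracks)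

-- ===== LEMMAS AND PROOFS =====

-- the order: keyLt is Python's tuple '<'; its basic facts
theorem keyLt_irrefl (a : String × String × String) : keyLt a a = false := by
  simp [keyLt]

theorem keyLt_trans {a b c : String × String × String} (h1 : keyLt a b = true) (h2 : keyLt b c = true) : keyLt a c = true := by
  simp only [keyLt, Bool.or_eq_true, Bool.and_eq_true, beq_iff_eq, decide_eq_true_eq] at *
  obtain ⟨a1, a2, a3⟩ := a; obtain ⟨b1, b2, b3⟩ := b; obtain ⟨c1, c2, c3⟩ := c
  simp only at *
  obtain h1 | ⟨e1, h1⟩ := h1 <;> obtain h2 | ⟨e2, h2⟩ := h2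
  · exact Or.inl (lt_trans h1 h2)
  · exact Or.inl (e2 ▸ h1)
  · exact Or.inl (e1 ▸ h2)
  · subst e1 e2; refine Or.inr ⟨rfl, ?_⟩
    obtain h1 | ⟨f1, h1⟩ := h1 <;> obtain h2 | ⟨f2, h2⟩ := h2
    · exact Or.inl (lt_trans h1 h2)
    · exact Or.inl (f2 ▸ h1)
    · exact Or.inl (f1 ▸ h2)
    · subst f1 f2; exact Or.inr ⟨rfl, lt_trans h1 h2⟩

theorem keyLt_antisymm {a b : String × String × String} (h1 : keyLt a b = false) (h2 : keyLt b a = false) : a = b := by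
  simp only [keyLt, Bool.or_eq_false_iff, Bool.and_eq_false_iff, beq_eq_false_iff_ne, ne_eq, decide_eq_false_iff_not, not_lt] at h1 h2
  obtain ⟨l1, h1⟩ := h1; obtain ⟨l2, h2⟩ := h2
  have e1 : a.1 = b.1 := le_antisymm l2 l1
  obtain h1 | h1 := h1
  · exact absurd e1 h1
  obtain h2 | h2 := h2
  · exact absurd e1.symm h2
  obtain ⟨m1, h1⟩ := h1; obtain ⟨m2, h2⟩ := h2
  have e2 : a.2.1 = b.2.1 := le_antisymm m2 m1
  obtain h1 | h1 := h1
  · exact absurd e2 h1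
  obtain h2 | h2 := h2
  · exact absurd e2.symm h2
  have e3 : a.2.2 = b.2.2 := le_antisymm h2 h1
  obtain ⟨a1, a2, a3⟩ := a; obtain ⟨b1, b2, b3⟩ := b
  simp_all

theorem keyLt_asymm {a b : String × String × String} (h : keyLt a b = true) : keyLt b a = false := by
  by_contra hc
  have hba : keyLt b a = true := by revert hc; cases keyLt b a <;> simp
  have := keyLt_trans h hba
  rw [keyLt_irrefl] at this; exact absurd this (by simp)

theorem keyLt_total {a b : String × String × String} (h : keyLt a b = false) (hne : a ≠ b) : keyLt b a = true := by
  by_contra hc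
  have : keyLt b a = false := by revert hc; cases keyLt b a <;> simp
  exact hne (keyLt_antisymm h this)

-- generic insertion sort with key kf (the ports' foldl loops are exactly this)
def insSort {α : Type} (kf : α → String × String × String) (l : List α) : List α :=
  l.foldl (fun acc x => PySem.List.insertBy (fun a b => keyLt (kf a) (kf b)) x acc) []

def SortedK {α : Type} (kf : α → String × String × String) (l : List α) : Prop :=
  l.Pairwise (fun a b => keyLt (kf b) (kf a) = false)

theorem sortByKey_eq (tracks : List (List (String × String))) : sortByKey tracks = insSort albumInfo tracks := rfl

theorem sortKeys_eq (ks : List (String × String × String)) : sortKeys ks = insSort (fun k => k) ks := rfl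

theorem insertBy_perm {α : Type} (before : α → α → Bool) (x : α) (ys : List α) :
    (PySem.List.insertBy before x ys).Perm (x :: ys) := by
  induction ys with
  | nil => simp [PySem.List.insertBy]
  | cons y ys ih =>
    simp only [PySem.List.insertBy]
    split
    · exact List.Perm.refl _
    · exact (ih.cons y).trans (List.Perm.swap x y ys)

theorem insSort_perm {α : Type} (kf : α → String × String × String) (l : List α) :
    (insSort kf l).Perm l := by
  suffices h : ∀ (acc : List α), (l.foldl (fun acc x => PySem.List.insertBy (fun a b => keyLt (kf a) (kf b)) x acc) acc).Perm (l ++ acc) by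
    simpa using h []
  induction l with
  | nil => intro acc; simp
  | cons x xs ih =>
    intro acc
    refine ((ih _).trans ?_)
    have h1 : (xs ++ PySem.List.insertBy (fun a b => keyLt (kf a) (kf b)) x acc).Perm (xs ++ (x :: acc)) :=
      List.Perm.append_left _ (insertBy_perm _ _ _)
    refine h1.trans ?_
    have h2 : (xs ++ (x :: acc)).Perm ((x :: xs) ++ acc) := by
      simpa using (List.perm_append_comm (l₁ := xs) (l₂ := [x])).append_right acc
    simpa using h2

theorem insertBy_sorted {α : Type} (kf : α → String × String × String) (x : α) {ys : List α}
    (hs : SortedK kf ys) : SortedK kf (PySem.List.insertBy (fun a b => keyLt (kf a) (kf b)) x ys) := by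
  induction ys with
  | nil => simp [PySem.List.insertBy, SortedK]
  | cons y ys ih =>
    simp only [PySem.List.insertBy]
    rw [SortedK, List.pairwise_cons] at hs
    split
    · rename_i hlt
      constructor
      · intro z hz
        rcases List.mem_cons.mp hz with rfl | hz
        · exact keyLt_asymm hlt
        · -- z ∈ ys; if keyLt (kf z) (kf x) then with hlt trans keyLt (kf z) (kf y), contra hs
          by_contra hc
          have hzx : keyLt (kf z) (kf x) = true := by revert hc; cases keyLt (kf z) (kf x) <;> simp
          have := keyLt_trans hzx hlt
          rw [hs.1 z hz] at this; exact absurd this (by simp)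
      · exact List.Pairwise.cons hs.1 hs.2
    · rename_i hnlt
      constructor
      · intro z hz
        rw [PySem.List.mem_insertBy] at hz
        rcases hz with rfl | hz
        · revert hnlt; simp only [Bool.not_eq_true]; intro h; exact h
        · exact hs.1 z hz
      · exact ih hs.2

theorem insSort_sorted {α : Type} (kf : α → String × String × String) (l : List α) :
    SortedK kf (insSort kf l) := by
  suffices h : ∀ (acc : List α), SortedK kf acc → SortedK kf (l.foldl (fun acc x => PySem.List.insertBy (fun a b => keyLt (kf a) (kf b)) x acc) acc) by
    exact h [] (by simp [SortedK])
  induction l with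
  | nil => intro acc h; simpa using h
  | cons x xs ih => intro acc h; exact ih _ (insertBy_sorted kf x h)

-- stability: filtering by a key-determined class commutes with the sort
theorem insertBy_filter {α : Type} (kf : α → String × String × String) (p : α → Bool)
    (k : String × String × String) (x : α) {ys : List α} (hs : SortedK kf ys) :
    (PySem.List.insertBy (fun a b => keyLt (kf a) (kf b)) x ys).filter (fun z => kf z == k && p z)
      = ys.filter (fun z => kf z == k && p z) ++ (if kf x == k && p x then [x] else []) := by
  induction ys with
  | nil => simp [PySem.List.insertBy, List.filter]; split <;> simp_all
  | cons y ys ih =>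
    simp only [PySem.List.insertBy]
    rw [SortedK, List.pairwise_cons] at hs
    split
    · rename_i hlt
      by_cases hk : kf x == k
      · -- no element of y :: ys has key k
        have hempty : (y :: ys).filter (fun z => kf z == k && p z) = [] := by
          rw [List.filter_eq_nil_iff]
          intro z hz
          suffices hzk : (kf z == k) = false by simp [hzk]
          by_contra hc
          have hzk : kf z = k := by revert hc; cases h : kf z == k <;> simp_all
          have hxk : kf x = k := by simpa using hk
          rcases List.mem_cons.mp hz with rfl | hz'
          · rw [hzk, ← hxk, keyLt_irrefl] at hlt; exact absurd hlt (by simp)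
          · have := hs.1 z hz'
            rw [hzk, ← hxk] at this
            have h2 : keyLt (kf x) (kf y) = true := hlt
            rw [h2] at this; exact absurd this (by simp)
        rw [List.filter_cons]
        split
        · simp [hempty]
        · rename_i hx
          have : (kf x == k && p x) = false := by revert hx; cases (kf x == k && p x) <;> simp
          simp [hempty]
      · have : (kf x == k && p x) = false := by simp_all
        simp [List.filter_cons, this]
    · rename_i hnlt
      rw [List.filter_cons, List.filter_cons, ih hs.2]
      split <;> simp

theorem insSort_filter {α : Type} (kf : α → String × String × String) (p : α → Bool)
    (k : String × String × String) (l : List α) :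
    (insSort kf l).filter (fun z => kf z == k && p z) = l.filter (fun z => kf z == k && p z) := by
  suffices h : ∀ (acc : List α), SortedK kf acc →
      (l.foldl (fun acc x => PySem.List.insertBy (fun a b => keyLt (kf a) (kf b)) x acc) acc).filter (fun z => kf z == k && p z)
        = acc.filter (fun z => kf z == k && p z) ++ l.filter (fun z => kf z == k && p z) by
    simpa using h [] (by simp [SortedK])
  induction l with
  | nil => intro acc h; simp
  | cons x xs ih =>
    intro acc h
    rw [List.foldl_cons, ih _ (insertBy_sorted kf x h), insertBy_filter kf p k x h, List.filter_cons]
    split <;> simp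

-- dedup facts
theorem foldl_add_cons_not_mem {α : Type} [BEq α] [LawfulBEq α] (k : α) (post : List α)
    (hk : k ∉ post) : ∀ (s : List α), (post.foldl PySem.Set.add (k :: s)) = k :: post.foldl PySem.Set.add s := by
  induction post with
  | nil => intro s; rfl
  | cons x xs ih =>
    intro s
    have hxk : x ≠ k := by intro h; exact hk (h ▸ List.mem_cons_self)
    have hstep : PySem.Set.add (k :: s) x = k :: PySem.Set.add s x := by
      simp only [PySem.Set.add, PySem.Set.contains, List.contains_cons]
      have : (x == k) = false := by simpa using hxk
      rw [this]
      simp only [Bool.false_or]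
      split <;> simp
    rw [List.foldl_cons, hstep, List.foldl_cons, ih (fun h => hk (List.mem_cons_of_mem _ h))]

theorem foldl_add_const {α : Type} [BEq α] [LawfulBEq α] (k : α) (pre : List α)
    (hpre : ∀ a ∈ pre, a = k) : ∀ (s : List α), k ∈ s → pre.foldl PySem.Set.add s = s := by
  induction pre with
  | nil => intro s _; rfl
  | cons x xs ih =>
    intro s hks
    have hx : x = k := hpre x List.mem_cons_self
    have : PySem.Set.add s x = s := by
      simp only [PySem.Set.add]
      have hmem : PySem.Set.contains s x = true := by
        simp only [PySem.Set.contains]; subst hx; simpa using hks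
      rw [if_pos hmem]
    rw [List.foldl_cons, this, ih (fun a ha => hpre a (List.mem_cons_of_mem _ ha)) s hks]

theorem dedup_block {α : Type} [BEq α] [LawfulBEq α] (k : α) (pre post : List α)
    (hpre : ∀ a ∈ pre, a = k) (hpost : k ∉ post) :
    PySem.List.dedup (k :: (pre ++ post)) = k :: PySem.List.dedup post := by
  have h1 : PySem.List.dedup (k :: (pre ++ post)) = (pre ++ post).foldl PySem.Set.add [k] := by
    rw [PySem.List.dedup_eq_ofList, PySem.Set.ofList_eq_foldl, List.foldl_cons]
    rfl
  rw [h1, List.foldl_append, foldl_add_const k pre hpre [k] List.mem_cons_self,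
    foldl_add_cons_not_mem k post hpost, PySem.List.dedup_eq_ofList, PySem.Set.ofList_eq_foldl]

theorem dedup_sublist {α : Type} [BEq α] [LawfulBEq α] (l : List α) :
    (PySem.List.dedup l).Sublist l := by
  suffices h : ∀ (s : List α), ∃ t, l.foldl PySem.Set.add s = s ++ t ∧ t.Sublist l by
    obtain ⟨t, ht, hs⟩ := h []
    rw [PySem.List.dedup_eq_ofList, PySem.Set.ofList_eq_foldl, ht]; simpa using hs
  induction l with
  | nil => intro s; exact ⟨[], by simp⟩
  | cons x xs ih =>
    intro s
    rw [List.foldl_cons]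
    by_cases hc : PySem.Set.contains s x
    · have : PySem.Set.add s x = s := by
        simp only [PySem.Set.add, PySem.Set.contains]
        rw [if_pos (by simpa using hc)]
      rw [this]
      obtain ⟨t, ht, hs⟩ := ih s
      exact ⟨t, ht, hs.cons x⟩
    · have : PySem.Set.add s x = s ++ [x] := by
        simp only [PySem.Set.add]; rw [if_neg (by simpa using hc)]
      rw [this]
      obtain ⟨t, ht, hs⟩ := ih (s ++ [x])
      exact ⟨x :: t, by simpa using ht, hs.cons₂ x⟩

-- groupby over a key-sorted list produces one group per distinct key, each group a filter
-- in a key-sorted list, nothing after the initial block of key k0 has key k0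
theorem dropWhile_key_ne {α : Type} (kf : α → String × String × String) (k0 : String × String × String) :
    ∀ (xs : List α), SortedK kf xs → (∀ y ∈ xs, keyLt (kf y) k0 = false) →
      ∀ y ∈ xs.dropWhile (fun y => kf y == k0), kf y ≠ k0 := by
  intro xs
  induction xs with
  | nil => intro _ _ y hy; simp at hy
  | cons z zs ih =>
    intro hs hb y hy
    rw [SortedK, List.pairwise_cons] at hs
    rw [List.dropWhile_cons] at hy
    by_cases hq : kf z == k0
    · rw [if_pos hq] at hy
      exact ih hs.2 (fun y hy => hb y (List.mem_cons_of_mem _ hy)) y hy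
    · rw [if_neg hq] at hy
      rcases List.mem_cons.mp hy with rfl | hy'
      · simpa using hq
      · intro hk
        have hz0 : kf z ≠ k0 := by simpa using hq
        have h1 : keyLt k0 (kf z) = true := keyLt_total (hb z List.mem_cons_self) hz0
        have h2 : keyLt (kf y) (kf z) = false := hs.1 y hy'
        rw [hk] at h2
        rw [h1] at h2; exact absurd h2 (by simp)

theorem groupbyKey_sorted : ∀ (l : List (List (String × String))), SortedK albumInfo l →
    groupbyKey l = (PySem.List.dedup (l.map albumInfo)).map
      (fun k => (k, l.filter (fun t => albumInfo t == k))) := by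
  intro l
  induction l using groupbyKey.induct with
  | case1 => intro _; simp [groupbyKey, PySem.List.dedup, PySem.Set.ofList]
  | case2 x xs ih =>
    intro hs
    have hs' := hs
    rw [SortedK, List.pairwise_cons] at hs'
    obtain ⟨hx1, hxs⟩ := hs'
    set k0 := albumInfo x with hk0
    set q : List (String × String) → Bool := fun y => albumInfo y == k0 with hq
    have hsplit : xs = xs.takeWhile q ++ xs.dropWhile q := (List.takeWhile_append_dropWhile).symm
    have hg : ∀ y ∈ xs.takeWhile q, albumInfo y = k0 := by
      intro y hy
      have := List.mem_takeWhile_imp hy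
      simpa [hq] using this
    have hrest_sorted : SortedK albumInfo (xs.dropWhile q) :=
      List.Pairwise.sublist (List.dropWhile_sublist _) hxs
    have hrest : ∀ y ∈ xs.dropWhile q, albumInfo y ≠ k0 :=
      dropWhile_key_ne albumInfo k0 xs hxs hx1
    have hdedup : PySem.List.dedup ((x :: xs).map albumInfo)
        = k0 :: PySem.List.dedup ((xs.dropWhile q).map albumInfo) := by
      have : (x :: xs).map albumInfo
          = k0 :: ((xs.takeWhile q).map albumInfo ++ (xs.dropWhile q).map albumInfo) := by
        rw [List.map_cons, ← List.map_append, ← hsplit]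
      rw [this]
      refine dedup_block k0 _ _ ?_ ?_
      · intro a ha
        obtain ⟨y, hy, rfl⟩ := List.mem_map.mp ha
        exact hg y hy
      · intro ha
        obtain ⟨y, hy, hyk⟩ := List.mem_map.mp ha
        exact hrest y hy hyk
    have hfilter0 : (x :: xs).filter (fun t => albumInfo t == k0) = x :: xs.takeWhile q := by
      rw [List.filter_cons, if_pos (by simp [hk0])]
      congr 1
      conv_lhs => rw [hsplit]
      rw [List.filter_append]
      have h1 : (xs.takeWhile q).filter (fun t => albumInfo t == k0) = xs.takeWhile q :=
        List.filter_eq_self.mpr (fun y hy => by simp [hg y hy])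
      have h2 : (xs.dropWhile q).filter (fun t => albumInfo t == k0) = [] :=
        List.filter_eq_nil_iff.mpr (fun y hy => by simpa using hrest y hy)
      rw [h1, h2, List.append_nil]
    rw [groupbyKey, hdedup, List.map_cons, ← hfilter0]
    congr 1
    rw [ih hrest_sorted]
    refine List.map_congr_left ?_
    intro k hk
    have hkmem : k ∈ (xs.dropWhile q).map albumInfo := by
      have := dedup_sublist ((xs.dropWhile q).map albumInfo)
      exact this.mem hk
    obtain ⟨y0, hy0, rfl⟩ := List.mem_map.mp hkmem
    have hkne : albumInfo y0 ≠ k0 := hrest y0 hy0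
    have hfk : (x :: xs).filter (fun t => albumInfo t == albumInfo y0)
        = (xs.dropWhile q).filter (fun t => albumInfo t == albumInfo y0) := by
      rw [List.filter_cons, if_neg (by simpa [hk0] using fun h => hkne h.symm)]
      conv_lhs => rw [hsplit]
      rw [List.filter_append]
      have h1 : (xs.takeWhile q).filter (fun t => albumInfo t == albumInfo y0) = [] :=
        List.filter_eq_nil_iff.mpr (fun y hy h => by
          exact hkne (by rw [← beq_iff_eq.mp h, hg y hy]))
      rw [h1, List.nil_append]
    rw [hfk]

-- the dict index: keys and per-key contents
theorem buildGroups_eq_foldl (tracks : List (List (String × String))) :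
    buildGroups tracks = (tracks.filter hasAlbum).foldl
      (fun d t => d.modify (albumInfo t) [] (fun l => l ++ [t])) PySem.Dict.empty := by
  unfold buildGroups
  exact PySem.List.foldl_if_eq_foldl_filter hasAlbum _ tracks _

theorem buildGroups_keys (tracks : List (List (String × String))) :
    (buildGroups tracks).keys = PySem.List.dedup ((tracks.filter hasAlbum).map albumInfo) := by
  rw [buildGroups_eq_foldl]
  rw [PySem.Dict.keys_foldl_modify_key (tracks.filter hasAlbum) albumInfo [] (fun _ t l => l ++ [t]) PySem.Dict.empty]
  rw [PySem.List.dedup_eq_ofList]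
  rfl

theorem getD_foldl_modify_append (k : String × String × String) :
    ∀ (l : List (List (String × String))) (d : PySem.Dict (String × String × String) (List (List (String × String)))),
      (l.foldl (fun d t => d.modify (albumInfo t) [] (fun g => g ++ [t])) d).getD k []
        = d.getD k [] ++ l.filter (fun t => albumInfo t == k) := by
  intro l
  induction l with
  | nil => intro d; simp
  | cons t ts ih =>
    intro d
    rw [List.foldl_cons, ih, PySem.Dict.modify, PySem.Dict.getD_insert, List.filter_cons]
    by_cases hk : k = albumInfo t
    · rw [if_pos hk, if_pos (by simp [hk]), hk]; simp
    · rw [if_neg hk, if_neg (by simpa using fun h => hk h.symm)]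

theorem buildGroups_getD (tracks : List (List (String × String))) (k : String × String × String) :
    (buildGroups tracks).getD k [] = (tracks.filter hasAlbum).filter (fun t => albumInfo t == k) := by
  rw [buildGroups_eq_foldl, getD_foldl_modify_append]
  rfl

-- nodup set is itself
theorem ofList_nodup_eq {α : Type} [BEq α] [LawfulBEq α] (l : List α) (h_nodup : l.Nodup) :
    PySem.Set.ofList l = l := by
  suffices h : ∀ (l : List α), l.Nodup → ∀ (s : List α), (∀ x ∈ l, x ∉ s) → l.foldl PySem.Set.add s = s ++ l by
    rw [PySem.Set.ofList_eq_foldl]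
    simpa using h l h_nodup [] (by simp)
  intro l
  induction l with
  | nil => intro _ s _; simp
  | cons x xs ih =>
    intro hnd s hnotin
    have hxs : PySem.Set.add s x = s ++ [x] := by
      simp only [PySem.Set.add, PySem.Set.contains]
      rw [if_neg (by simpa using hnotin x List.mem_cons_self)]
    rw [List.foldl_cons, hxs, ih (List.Nodup.of_cons hnd) (s ++ [x]) ?_]
    · simp
    · intro y hy
      simp only [List.mem_append, List.mem_singleton]
      rintro (h | rfl)
      · exact hnotin y (List.mem_cons_of_mem _ hy) h
      · exact (List.nodup_cons.mp hnd).1 hy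

-- the common value of both per-key group contents
def tracksWith (tracks : List (List (String × String))) (k : String × String × String) : List (List (String × String)) :=
  tracks.filter (fun t => albumInfo t == k && hasAlbum t)

theorem filter_sorted_eq (tracks : List (List (String × String))) (k : String × String × String) :
    ((sortByKey tracks).filter hasAlbum).filter (fun t => albumInfo t == k) = tracksWith tracks k := by
  rw [sortByKey_eq, List.filter_filter]
  exact insSort_filter albumInfo hasAlbum k tracks

theorem getD_eq (tracks : List (List (String × String))) (k : String × String × String) :
    (buildGroups tracks).getD k [] = tracksWith tracks k := by
  rw [buildGroups_getD, List.filter_filter]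
  rfl

theorem sorted_f (tracks : List (List (String × String))) :
    SortedK albumInfo ((sortByKey tracks).filter hasAlbum) := by
  rw [sortByKey_eq]
  exact List.Pairwise.sublist List.filter_sublist (insSort_sorted albumInfo tracks)

theorem keys_eq (tracks : List (List (String × String))) :
    sortKeys (buildGroups tracks).keys
      = PySem.List.dedup (((sortByKey tracks).filter hasAlbum).map albumInfo) := by
  rw [buildGroups_keys, sortKeys_eq]
  have hperm_f : ((sortByKey tracks).filter hasAlbum).Perm (tracks.filter hasAlbum) := by
    rw [sortByKey_eq]; exact (insSort_perm albumInfo tracks).filter hasAlbum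
  have hKAnodup : (PySem.List.dedup (((sortByKey tracks).filter hasAlbum).map albumInfo)).Nodup := by
    rw [PySem.List.dedup_eq_ofList]; exact PySem.Set.nodup_ofList _
  have hKBnodup : (insSort (fun k => k) (PySem.List.dedup ((tracks.filter hasAlbum).map albumInfo))).Nodup := by
    refine (insSort_perm _ _).nodup_iff.mpr ?_
    rw [PySem.List.dedup_eq_ofList]; exact PySem.Set.nodup_ofList _
  have hperm : (insSort (fun k => k) (PySem.List.dedup ((tracks.filter hasAlbum).map albumInfo))).Perm
      (PySem.List.dedup (((sortByKey tracks).filter hasAlbum).map albumInfo)) := by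
    rw [List.perm_ext_iff_of_nodup hKBnodup hKAnodup]
    intro a
    have h1 : a ∈ insSort (fun k => k) (PySem.List.dedup ((tracks.filter hasAlbum).map albumInfo))
        ↔ a ∈ (tracks.filter hasAlbum).map albumInfo := by
      rw [(insSort_perm _ _).mem_iff, PySem.List.dedup_eq_ofList, PySem.Set.mem_ofList]
    have h2 : a ∈ PySem.List.dedup (((sortByKey tracks).filter hasAlbum).map albumInfo)
        ↔ a ∈ ((sortByKey tracks).filter hasAlbum).map albumInfo := by
      rw [PySem.List.dedup_eq_ofList, PySem.Set.mem_ofList]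
    rw [h1, h2]
    exact ((hperm_f.map albumInfo).mem_iff).symm
  have hKB_sorted : List.Pairwise (fun a b => keyLt b a = false)
      (insSort (fun k => k) (PySem.List.dedup ((tracks.filter hasAlbum).map albumInfo))) :=
    insSort_sorted (fun k => k) _
  have hKA_sorted : List.Pairwise (fun a b => keyLt b a = false)
      (PySem.List.dedup (((sortByKey tracks).filter hasAlbum).map albumInfo)) := by
    refine List.Pairwise.sublist (dedup_sublist _) ?_
    rw [List.pairwise_map]
    exact sorted_f tracks
  exact List.eq_of_perm_of_sorted (fun a b _ _ h1 h2 => keyLt_antisymm h2 h1)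
    hKB_sorted hKA_sorted hperm

-- ===== VERDICT (by name: the statement is the Claim_ definition above) =====
theorem cluster_albums_spec : Claim_equal_cluster_albums := by
  intro tracks min_tracks _
  unfold Spec_cluster_albums cluster_albums cluster_albums_alt
  simp only []
  have hgroup : groupbyKey ((sortByKey tracks).filter hasAlbum)
      = (PySem.List.dedup (((sortByKey tracks).filter hasAlbum).map albumInfo)).map
          (fun k => (k, tracksWith tracks k)) := by
    rw [groupbyKey_sorted _ (sorted_f tracks)]
    exact List.map_congr_left (fun k _ => by rw [filter_sorted_eq])
  set KA := PySem.List.dedup (((sortByKey tracks).filter hasAlbum).map albumInfo) with hKA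
  have hmatched :
      (groupbyKey ((sortByKey tracks).filter hasAlbum)).filter
          (fun g => min_tracks < (g.2.length : Int))
        = ((sortKeys (buildGroups tracks).keys).filter
            (fun k => min_tracks < (((buildGroups tracks).getD k []).length : Int))).map
            (fun k => (k, (buildGroups tracks).getD k [])) := by
    rw [hgroup, keys_eq, List.filter_map]
    simp only [getD_eq]
    rfl
  rw [hmatched]
  refine Prod.ext rfl ?_
  refine List.filter_congr (fun t _ => ?_)
  set M := ((sortKeys (buildGroups tracks).keys).filter
      (fun k => min_tracks < (((buildGroups tracks).getD k []).length : Int))).map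
      (fun k => (k, (buildGroups tracks).getD k []))
  have hMfst : M.map (fun ab => ab.1) = (sortKeys (buildGroups tracks).keys).filter
      (fun k => min_tracks < (((buildGroups tracks).getD k []).length : Int)) := by
    rw [List.map_map]; exact List.map_id _
  have hnodup : (M.map (fun ab => ab.1)).Nodup := by
    rw [hMfst]
    refine List.Nodup.filter _ ?_
    rw [keys_eq]
    rw [PySem.List.dedup_eq_ofList]; exact PySem.Set.nodup_ofList _
  rw [ofList_nodup_eq _ hnodup]
  rfl
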